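-- pv_equiv track=rewrite | github.com/nevinbuilds/bruniai-action | src/playwright_utils/bounding_boxes.py | _match_section_to_analysis
-- ===== SOURCE A (Python) =====
-- def _match_section_to_analysis(section, analysis_section):
--     """Match a DOM section to analysis section data.
--
--     Args:
--         section: DOM section data
--         analysis_section: Analysis section data
--
--     Returns:
--         bool: True if sections match
--     """
--     # Match by HTML ID
--     if analysis_section.get('html_id') and section.get('id'):
--         if analysis_section['html_id'].lower() == section['id'].lower():
--             return True
--
--     # Match by HTML classes
--     if analysis_section.get('html_classes') and section.get('className'):
--         analysis_classes = set(analysis_section['html_classes'].lower().split())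
--         section_classes = set(section['className'].lower().split())
--         if analysis_classes.intersection(section_classes):
--             return True
--
--     # Match by ARIA label
--     if analysis_section.get('aria_label') and section.get('ariaLabel'):
--         if analysis_section['aria_label'].lower() == section['ariaLabel'].lower():
--             return True
--
--     # Match by content identifier
--     if analysis_section.get('content_identifier') and section.get('textContent'):
--         content_words = analysis_section['content_identifier'].lower().split()
--         section_text = section['textContent'].lower()
--         if all(word in section_text for word in content_words):
--             return True
--
--     # Match by tag name
--     if analysis_section.get('html_element') and section.get('tag'):
--         if analysis_section['html_element'].lower() == section['tag'].lower():
--             return True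
--
--     return False
-- ===== SOURCE B (Python) =====
-- def _add_feature(feats, tag, v):
--     """Add the tagged lowercase token for one scalar attribute (skipped if falsy)."""
--     if v:
--         feats.add((tag, v.lower()))
--
--
-- def _add_class_features(feats, v):
--     """Add one tagged token per class name (skipped if falsy)."""
--     if v:
--         for c in v.lower().split():
--             feats.add(('class', c))
--
--
-- def _features(d, id_key, class_key, aria_key, tag_key):
--     """Canonical feature set of one side: tagged lowercase tokens for id, classes, aria label and tag."""
--     feats = set()
--     _add_feature(feats, 'id', d.get(id_key))
--     _add_class_features(feats, d.get(class_key))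
--     _add_feature(feats, 'aria', d.get(aria_key))
--     _add_feature(feats, 'tag', d.get(tag_key))
--     return feats
--
--
-- def _match_section_to_analysis(section, analysis_section):
--     """Build each side's canonical feature set once and intersect; only the
--     content-identifier rule (a containment test, not an equality) is checked apart."""
--     a_feats = _features(analysis_section, 'html_id', 'html_classes', 'aria_label', 'html_element')
--     s_feats = _features(section, 'id', 'className', 'ariaLabel', 'tag')
--     if a_feats & s_feats:
--         return True
--     ci = analysis_section.get('content_identifier')
--     tx = section.get('textContent')
--     return bool(ci and tx and all(w in tx.lower() for w in ci.lower().split()))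
-- ===== Notes on version B (the rewrite author's own statement) =====
-- stated objective: alternative
-- what changed: Instead of A's five ordered key-pair checks, B canonicalises each side once into a set of tagged lowercase feature tokens (id/class/aria/tag) and decides four of the five rules by a single set intersection, with only the non-equational content-identifier substring rule checked separately; correct because any one match suffices so order is irrelevant and the tags keep categories disjoint.
import Mathlib
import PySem

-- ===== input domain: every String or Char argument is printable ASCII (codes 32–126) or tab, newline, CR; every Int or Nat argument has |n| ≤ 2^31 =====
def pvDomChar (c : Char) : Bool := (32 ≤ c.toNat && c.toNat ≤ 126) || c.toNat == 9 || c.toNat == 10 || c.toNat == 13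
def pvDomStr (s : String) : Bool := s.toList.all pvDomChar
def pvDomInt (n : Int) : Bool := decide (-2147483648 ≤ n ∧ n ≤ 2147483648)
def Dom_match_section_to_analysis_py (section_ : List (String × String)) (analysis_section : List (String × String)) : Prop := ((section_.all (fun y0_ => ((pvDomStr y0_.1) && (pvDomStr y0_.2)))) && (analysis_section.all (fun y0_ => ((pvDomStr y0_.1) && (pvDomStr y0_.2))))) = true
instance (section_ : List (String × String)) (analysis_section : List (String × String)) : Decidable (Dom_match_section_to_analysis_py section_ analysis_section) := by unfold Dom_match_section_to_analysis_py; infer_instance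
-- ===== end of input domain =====

-- B canonicalises each side once into a set of tagged lowercase feature tokens and decides
-- four of the five rules by a single set intersection (objective: alternative algorithm, same cost).

-- ===== PORT A =====
-- truthiness of dict.get(k): None and '' are falsy
def pyTruthyStr (o : Option String) : Bool :=
  match o with
  | none => false
  | some t => !t.toList.isEmpty

def match_section_to_analysis_py (section_ : List (String × String)) (analysis_section : List (String × String)) : Bool :=
  let sD : PySem.Dict String String := PySem.Dict.mk section_
  let aD : PySem.Dict String String := PySem.Dict.mk analysis_section
  -- each stepK is the code from the K-th `if` block on; Python's fall-through `return True`/continue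
  let step5 : Bool :=
    if pyTruthyStr (aD.get? "html_element") && pyTruthyStr (sD.get? "tag") then
      if PySem.Str.lower (aD.getD "html_element" "") == PySem.Str.lower (sD.getD "tag" "") then true
      else false
    else false
  let step4 : Bool :=
    if pyTruthyStr (aD.get? "content_identifier") && pyTruthyStr (sD.get? "textContent") then
      let contentWords := PySem.Str.split₀ (PySem.Str.lower (aD.getD "content_identifier" ""))
      let sectionText := PySem.Str.lower (sD.getD "textContent" "")
      if contentWords.all (fun word => PySem.Str.isIn word sectionText) then true
      else step5
    else step5
  let step3 : Bool :=
    if pyTruthyStr (aD.get? "aria_label") && pyTruthyStr (sD.get? "ariaLabel") then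
      if PySem.Str.lower (aD.getD "aria_label" "") == PySem.Str.lower (sD.getD "ariaLabel" "") then true
      else step4
    else step4
  let step2 : Bool :=
    if pyTruthyStr (aD.get? "html_classes") && pyTruthyStr (sD.get? "className") then
      let analysisClasses := PySem.Set.ofList (PySem.Str.split₀ (PySem.Str.lower (aD.getD "html_classes" "")))
      let sectionClasses := PySem.Set.ofList (PySem.Str.split₀ (PySem.Str.lower (sD.getD "className" "")))
      if !(PySem.Set.inter analysisClasses sectionClasses).isEmpty then true
      else step3
    else step3
  if pyTruthyStr (aD.get? "html_id") && pyTruthyStr (sD.get? "id") then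
    if PySem.Str.lower (aD.getD "html_id" "") == PySem.Str.lower (sD.getD "id" "") then true
    else step2
  else step2

-- ===== PORT B =====
-- _add_feature(feats, tag, v): add the tagged lowercase token if v is truthy
def addFeature (feats : PySem.Set (String × String)) (tg : String) (v : Option String) : PySem.Set (String × String) :=
  match v with
  | some v => if !v.toList.isEmpty then PySem.Set.add feats (tg, PySem.Str.lower v) else feats
  | none => feats

-- _add_class_features(feats, v): one tagged token per class name
def addClassFeatures (feats : PySem.Set (String × String)) (v : Option String) : PySem.Set (String × String) :=
  match v with
  | some v => if !v.toList.isEmpty then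
      (PySem.Str.split₀ (PySem.Str.lower v)).foldl (fun s c => PySem.Set.add s ("class", c)) feats
    else feats
  | none => feats

-- _features(d, id_key, class_key, aria_key, tag_key)
def featuresOf (d : PySem.Dict String String) (idK classK ariaK tagK : String) : PySem.Set (String × String) :=
  let feats : PySem.Set (String × String) := PySem.Set.empty
  let feats := addFeature feats "id" (d.get? idK)
  let feats := addClassFeatures feats (d.get? classK)
  let feats := addFeature feats "aria" (d.get? ariaK)
  addFeature feats "tag" (d.get? tagK)

def match_section_to_analysis_py_alt (section_ : List (String × String)) (analysis_section : List (String × String)) : Bool :=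
  let aF := featuresOf (PySem.Dict.mk analysis_section) "html_id" "html_classes" "aria_label" "html_element"
  let sF := featuresOf (PySem.Dict.mk section_) "id" "className" "ariaLabel" "tag"
  if !(PySem.Set.inter aF sF).isEmpty then true
  else
    match (PySem.Dict.mk analysis_section).get? "content_identifier",
          (PySem.Dict.mk section_).get? "textContent" with
    | some ci, some tx =>
        !ci.toList.isEmpty && !tx.toList.isEmpty &&
        (PySem.Str.split₀ (PySem.Str.lower ci)).all (fun w => PySem.Str.isIn w (PySem.Str.lower tx))
    | _, _ => false

-- ===== PRECONDITION & SPEC =====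
def Spec_match_section_to_analysis_py (section_ : List (String × String)) (analysis_section : List (String × String)) (out : Bool) : Prop := out = match_section_to_analysis_py_alt section_ analysis_section
instance (section_ : List (String × String)) (analysis_section : List (String × String)) (out : Bool) : Decidable (Spec_match_section_to_analysis_py section_ analysis_section out) := by unfold Spec_match_section_to_analysis_py; infer_instance

-- ===== CLAIM =====
def Claim_equal_match_section_to_analysis_py : Prop := ∀ (section_ : List (String × String)) (analysis_section : List (String × String)), Dom_match_section_to_analysis_py section_ analysis_section → Spec_match_section_to_analysis_py section_ analysis_section (match_section_to_analysis_py section_ analysis_section)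

-- ===== LEMMAS AND PROOFS =====

-- A's guarded fall-through block equals "this clause fired" ORed with the rest.
theorem step_eq (aD sD : PySem.Dict String String) (ka ks : String) (p : String → String → Bool) (rest : Bool) :
    (if pyTruthyStr (aD.get? ka) && pyTruthyStr (sD.get? ks) then
       (if p (aD.getD ka "") (sD.getD ks "") then true else rest)
     else rest)
    = ((match aD.get? ka, sD.get? ks with
        | some av, some sv =>
            if !av.toList.isEmpty && !sv.toList.isEmpty then p av sv else false
        | _, _ => false) || rest) := by
  rw [PySem.Dict.getD_eq_get?_getD, PySem.Dict.getD_eq_get?_getD]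
  cases hg : aD.get? ka with
  | none => simp [pyTruthyStr]
  | some av =>
    cases hh : sD.get? ks with
    | none => simp [pyTruthyStr]
    | some sv =>
      simp only [pyTruthyStr, Option.getD_some]
      cases hE : (!av.toList.isEmpty && !sv.toList.isEmpty) with
      | false => simp
      | true => simp

-- nonempty intersection of two sets = some common element (Prop form)
theorem inter_nonempty_iff {α : Type} [BEq α] [LawfulBEq α] (A B : PySem.Set α) :
    (!(PySem.Set.inter A B).isEmpty) = true ↔ ∃ x, x ∈ A ∧ x ∈ B := by
  rw [Bool.not_eq_eq_eq_not, Bool.not_true, List.isEmpty_eq_false_iff_exists_mem]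
  constructor
  · rintro ⟨x, hx⟩; exact ⟨x, (PySem.Set.mem_inter _ _ _).mp hx⟩
  · rintro ⟨x, hx⟩; exact ⟨x, (PySem.Set.mem_inter _ _ _).mpr hx⟩

-- the generic clause Bool as a Prop
theorem clause_iff (g h : Option String) (p : String → String → Bool) :
    (match g, h with
     | some av, some sv =>
         if !av.toList.isEmpty && !sv.toList.isEmpty then p av sv else false
     | _, _ => false) = true
    ↔ ∃ av sv, g = some av ∧ h = some sv ∧ av ≠ "" ∧ sv ≠ "" ∧ p av sv = true := by
  cases g with
  | none => simp
  | some av =>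
    cases h with
    | none => simp
    | some sv =>
      by_cases hA : av = "" <;> by_cases hS : sv = "" <;>
        simp [hA, hS]

-- membership in foldl-add over class words
theorem mem_foldl_add_class (x : String × String) (l : List String) (s : PySem.Set (String × String)) :
    x ∈ l.foldl (fun s c => PySem.Set.add s ("class", c)) s ↔ x ∈ s ∨ ∃ w ∈ l, x = ("class", w) := by
  induction l generalizing s with
  | nil => simp
  | cons c cs ih =>
    rw [List.foldl_cons, ih, PySem.Set.mem_add]
    constructor
    · rintro (⟨h | h⟩ | ⟨w, hw, hx⟩)
      · exact Or.inl h
      · exact Or.inr ⟨c, by simp, h⟩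
      · exact Or.inr ⟨w, by simp [hw], hx⟩
    · rintro (h | ⟨w, hw, hx⟩)
      · exact Or.inl (Or.inl h)
      · rcases List.mem_cons.mp hw with h | h
        · subst h; exact Or.inl (Or.inr hx)
        · exact Or.inr ⟨w, h, hx⟩

theorem mem_addFeature (x : String × String) (s : PySem.Set (String × String)) (tg : String) (o : Option String) :
    x ∈ addFeature s tg o ↔ x ∈ s ∨ ∃ v, o = some v ∧ v ≠ "" ∧ x = (tg, PySem.Str.lower v) := by
  cases o with
  | none => simp [addFeature]
  | some v => by_cases h : v = "" <;> simp [addFeature, h, PySem.Set.mem_add]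

theorem mem_addClassFeatures (x : String × String) (s : PySem.Set (String × String)) (o : Option String) :
    x ∈ addClassFeatures s o ↔
      x ∈ s ∨ ∃ v, o = some v ∧ v ≠ "" ∧ ∃ w ∈ PySem.Str.split₀ (PySem.Str.lower v), x = ("class", w) := by
  cases o with
  | none => simp [addClassFeatures]
  | some v => by_cases h : v = "" <;> simp [addClassFeatures, h, mem_foldl_add_class]

-- membership in a feature set
theorem mem_featuresOf (d : PySem.Dict String String) (iK cK aK tK : String) (x : String × String) :
    x ∈ featuresOf d iK cK aK tK ↔
      (∃ v, d.get? iK = some v ∧ v ≠ "" ∧ x = ("id", PySem.Str.lower v)) ∨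
      (∃ v, d.get? cK = some v ∧ v ≠ "" ∧
        ∃ w ∈ PySem.Str.split₀ (PySem.Str.lower v), x = ("class", w)) ∨
      (∃ v, d.get? aK = some v ∧ v ≠ "" ∧ x = ("aria", PySem.Str.lower v)) ∨
      (∃ v, d.get? tK = some v ∧ v ≠ "" ∧ x = ("tag", PySem.Str.lower v)) := by
  show x ∈ addFeature (addFeature (addClassFeatures (addFeature PySem.Set.empty "id" (d.get? iK)) (d.get? cK)) "aria" (d.get? aK)) "tag" (d.get? tK) ↔ _
  rw [mem_addFeature, mem_addFeature, mem_addClassFeatures, mem_addFeature]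
  simp only [PySem.Set.empty, List.mem_nil_iff, false_or, or_assoc]

-- the four equality/overlap rules as one common feature
theorem exists_common_feature_iff (dA dS : PySem.Dict String String)
    (iA cA aA tA iS cS aS tS : String) :
    (∃ x, x ∈ featuresOf dA iA cA aA tA ∧ x ∈ featuresOf dS iS cS aS tS) ↔
      ((∃ av sv, dA.get? iA = some av ∧ dS.get? iS = some sv ∧ av ≠ "" ∧ sv ≠ "" ∧
          PySem.Str.lower av = PySem.Str.lower sv) ∨
       (∃ av sv, dA.get? cA = some av ∧ dS.get? cS = some sv ∧ av ≠ "" ∧ sv ≠ "" ∧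
          ∃ w, w ∈ PySem.Str.split₀ (PySem.Str.lower av) ∧ w ∈ PySem.Str.split₀ (PySem.Str.lower sv)) ∨
       (∃ av sv, dA.get? aA = some av ∧ dS.get? aS = some sv ∧ av ≠ "" ∧ sv ≠ "" ∧
          PySem.Str.lower av = PySem.Str.lower sv) ∨
       (∃ av sv, dA.get? tA = some av ∧ dS.get? tS = some sv ∧ av ≠ "" ∧ sv ≠ "" ∧
          PySem.Str.lower av = PySem.Str.lower sv)) := by
  constructor
  · rintro ⟨x, hA, hS⟩
    rw [mem_featuresOf] at hA hS
    rcases hA with ⟨v, hv, hne, rfl⟩ | ⟨v, hv, hne, w, hw, rfl⟩ | ⟨v, hv, hne, rfl⟩ | ⟨v, hv, hne, rfl⟩ <;>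
      simp only [Prod.mk.injEq, String.reduceEq, false_and, and_false, exists_false,
        false_or, or_false, true_and] at hS
    · obtain ⟨v', hv', hne', heq⟩ := hS
      exact Or.inl ⟨v, v', hv, hv', hne, hne', heq⟩
    · obtain ⟨v', hv', hne', w', hw', heq⟩ := hS
      exact Or.inr (Or.inl ⟨v, v', hv, hv', hne, hne', w, hw, heq ▸ hw'⟩)
    · obtain ⟨v', hv', hne', heq⟩ := hS
      exact Or.inr (Or.inr (Or.inl ⟨v, v', hv, hv', hne, hne', heq⟩))
    · obtain ⟨v', hv', hne', heq⟩ := hS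
      exact Or.inr (Or.inr (Or.inr ⟨v, v', hv, hv', hne, hne', heq⟩))
  · rintro (⟨av, sv, ha, hs, hna, hns, heq⟩ | ⟨av, sv, ha, hs, hna, hns, w, hwa, hws⟩ |
      ⟨av, sv, ha, hs, hna, hns, heq⟩ | ⟨av, sv, ha, hs, hna, hns, heq⟩)
    · exact ⟨("id", PySem.Str.lower av), (mem_featuresOf ..).mpr (Or.inl ⟨av, ha, hna, rfl⟩),
        (mem_featuresOf ..).mpr (Or.inl ⟨sv, hs, hns, by rw [heq]⟩)⟩
    · exact ⟨("class", w),
        (mem_featuresOf ..).mpr (Or.inr (Or.inl ⟨av, ha, hna, w, hwa, rfl⟩)),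
        (mem_featuresOf ..).mpr (Or.inr (Or.inl ⟨sv, hs, hns, w, hws, rfl⟩))⟩
    · exact ⟨("aria", PySem.Str.lower av),
        (mem_featuresOf ..).mpr (Or.inr (Or.inr (Or.inl ⟨av, ha, hna, rfl⟩))),
        (mem_featuresOf ..).mpr (Or.inr (Or.inr (Or.inl ⟨sv, hs, hns, by rw [heq]⟩)))⟩
    · exact ⟨("tag", PySem.Str.lower av),
        (mem_featuresOf ..).mpr (Or.inr (Or.inr (Or.inr ⟨av, ha, hna, rfl⟩))),
        (mem_featuresOf ..).mpr (Or.inr (Or.inr (Or.inr ⟨sv, hs, hns, by rw [heq]⟩)))⟩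

-- each Bool clause as its Prop; for the plain lowercase-equality clauses
-- B's set-intersection test equals the OR of A's four equality/overlap clauses
theorem inter_eq_clauses (dA dS : PySem.Dict String String)
    (iA cA aA tA iS cS aS tS : String) :
    (!(PySem.Set.inter (featuresOf dA iA cA aA tA) (featuresOf dS iS cS aS tS)).isEmpty)
    = ((match dA.get? iA, dS.get? iS with
        | some av, some sv => if !av.toList.isEmpty && !sv.toList.isEmpty then
            (PySem.Str.lower av == PySem.Str.lower sv) else false
        | _, _ => false) ||
       (match dA.get? cA, dS.get? cS with
        | some av, some sv => if !av.toList.isEmpty && !sv.toList.isEmpty then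
            !(PySem.Set.inter (PySem.Set.ofList (PySem.Str.split₀ (PySem.Str.lower av)))
                (PySem.Set.ofList (PySem.Str.split₀ (PySem.Str.lower sv)))).isEmpty else false
        | _, _ => false) ||
       (match dA.get? aA, dS.get? aS with
        | some av, some sv => if !av.toList.isEmpty && !sv.toList.isEmpty then
            (PySem.Str.lower av == PySem.Str.lower sv) else false
        | _, _ => false) ||
       (match dA.get? tA, dS.get? tS with
        | some av, some sv => if !av.toList.isEmpty && !sv.toList.isEmpty then
            (PySem.Str.lower av == PySem.Str.lower sv) else false
        | _, _ => false)) := by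
  rw [Bool.eq_iff_iff]
  rw [inter_nonempty_iff, exists_common_feature_iff]
  simp only [Bool.or_eq_true, clause_iff, beq_iff_eq]
  constructor
  · rintro (h | h | h | h)
    · exact Or.inl (Or.inl (Or.inl h))
    · refine Or.inl (Or.inl (Or.inr ?_))
      obtain ⟨av, sv, ha, hs, hna, hns, w, hwa, hws⟩ := h
      refine ⟨av, sv, ha, hs, hna, hns, ?_⟩
      rw [inter_nonempty_iff]
      exact ⟨w, (PySem.Set.mem_ofList ..).mpr hwa, (PySem.Set.mem_ofList ..).mpr hws⟩
    · exact Or.inl (Or.inr h)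
    · exact Or.inr h
  · rintro (((h | h) | h) | h)
    · exact Or.inl h
    · refine Or.inr (Or.inl ?_)
      obtain ⟨av, sv, ha, hs, hna, hns, hint⟩ := h
      rw [inter_nonempty_iff] at hint
      obtain ⟨w, hwa, hws⟩ := hint
      exact ⟨av, sv, ha, hs, hna, hns, w, (PySem.Set.mem_ofList ..).mp hwa, (PySem.Set.mem_ofList ..).mp hws⟩
    · exact Or.inr (Or.inr (Or.inl h))
    · exact Or.inr (Or.inr (Or.inr h))

-- B's content check equals A's content clause
theorem content_eq (g h : Option String) :
    (match g, h with
     | some ci, some tx =>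
         !ci.toList.isEmpty && !tx.toList.isEmpty &&
         (PySem.Str.split₀ (PySem.Str.lower ci)).all (fun w => PySem.Str.isIn w (PySem.Str.lower tx))
     | _, _ => false)
    = (match g, h with
       | some av, some sv =>
           if !av.toList.isEmpty && !sv.toList.isEmpty then
             (PySem.Str.split₀ (PySem.Str.lower av)).all (fun w => PySem.Str.isIn w (PySem.Str.lower sv))
           else false
       | _, _ => false) := by
  cases g with
  | none => rfl
  | some ci =>
    cases h with
    | none => rfl
    | some tx =>
      cases hE : (!ci.toList.isEmpty && !tx.toList.isEmpty) <;> simp [hE]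

theorem match_eq (section_ analysis_section : List (String × String)) :
    match_section_to_analysis_py section_ analysis_section
      = match_section_to_analysis_py_alt section_ analysis_section := by
  unfold match_section_to_analysis_py match_section_to_analysis_py_alt
  rw [step_eq _ _ _ _ (fun a s => PySem.Str.lower a == PySem.Str.lower s),
      step_eq _ _ _ _ (fun a s =>
        !(PySem.Set.inter (PySem.Set.ofList (PySem.Str.split₀ (PySem.Str.lower a)))
            (PySem.Set.ofList (PySem.Str.split₀ (PySem.Str.lower s)))).isEmpty),
      step_eq _ _ _ _ (fun a s =>
        (PySem.Str.split₀ (PySem.Str.lower a)).all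
          (fun word => PySem.Str.isIn word (PySem.Str.lower s))),
      step_eq _ _ _ _ (fun a s => PySem.Str.lower a == PySem.Str.lower s),
      step_eq _ _ _ _ (fun a s => PySem.Str.lower a == PySem.Str.lower s)]
  rw [show (∀ (b c : Bool), (if b then true else c) = (b || c)) from fun b c => by cases b <;> rfl]
  rw [inter_eq_clauses, content_eq]
  -- both sides are now the same five clauses; rearrange the or-chain
  generalize (match (PySem.Dict.mk analysis_section).get? "html_id", (PySem.Dict.mk section_).get? "id" with
      | some av, some sv => (if !av.toList.isEmpty && !sv.toList.isEmpty then
          (PySem.Str.lower av == PySem.Str.lower sv) else false)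
      | _, _ => false) = b1
  generalize (match (PySem.Dict.mk analysis_section).get? "html_classes", (PySem.Dict.mk section_).get? "className" with
      | some av, some sv => (if !av.toList.isEmpty && !sv.toList.isEmpty then
          !(PySem.Set.inter (PySem.Set.ofList (PySem.Str.split₀ (PySem.Str.lower av)))
              (PySem.Set.ofList (PySem.Str.split₀ (PySem.Str.lower sv)))).isEmpty else false)
      | _, _ => false) = b2
  generalize (match (PySem.Dict.mk analysis_section).get? "aria_label", (PySem.Dict.mk section_).get? "ariaLabel" with
      | some av, some sv => (if !av.toList.isEmpty && !sv.toList.isEmpty then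
          (PySem.Str.lower av == PySem.Str.lower sv) else false)
      | _, _ => false) = b3
  generalize (match (PySem.Dict.mk analysis_section).get? "content_identifier", (PySem.Dict.mk section_).get? "textContent" with
      | some av, some sv => (if !av.toList.isEmpty && !sv.toList.isEmpty then
          (PySem.Str.split₀ (PySem.Str.lower av)).all (fun word => PySem.Str.isIn word (PySem.Str.lower sv)) else false)
      | _, _ => false) = b4
  generalize (match (PySem.Dict.mk analysis_section).get? "html_element", (PySem.Dict.mk section_).get? "tag" with
      | some av, some sv => (if !av.toList.isEmpty && !sv.toList.isEmpty then
          (PySem.Str.lower av == PySem.Str.lower sv) else false)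
      | _, _ => false) = b5
  cases b1 <;> cases b2 <;> cases b3 <;> cases b4 <;> cases b5 <;> rfl

-- ===== VERDICT =====
theorem match_section_to_analysis_py_spec : Claim_equal_match_section_to_analysis_py := by
  intro s a _
  exact match_eq s a
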